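-- pv_equiv track=rewrite | github.com/The-sea-is-the-color-of-the-sky/gene_operations | 1.1.1.1/package/gene_operations.py | recursive_search
-- ===== SOURCE A (Python) =====
-- def recursive_search(keys, a_to_b, b_to_a, depth=3, fuzzy=False, set_progress_status=None):
--     """
--     递归地在双向映射关系中查找与keys相关的所有基因。
--     支持精确和模糊两种查找方式。
--     """
--     if set_progress_status:
--         set_progress_status("递归搜索匹配基因")
--     found = set(keys)
--     current = set(keys)
--     for _ in range(depth):
--         next_found = set()
--         for key in current:
--             if fuzzy:
--                 next_found.update(b for a in a_to_b if key in str(a) and a != key for b in a_to_b[a])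
--                 next_found.update(a for b in b_to_a if key in str(b) and b != key for a in b_to_a[b])
--             else:
--                 next_found |= a_to_b.get(key, set())
--                 next_found |= b_to_a.get(key, set())
--         new = next_found - found
--         if not new:
--             break
--         found |= new
--         current = new
--     return found - set(keys)
-- ===== SOURCE B (Python) =====
-- def recursive_search(keys, a_to_b, b_to_a, depth=3, fuzzy=False, set_progress_status=None):
--     """BFS with a substring->map-keys hash index built once for fuzzy mode (the per-key
--     scan over all map keys disappears: neighbours come from one dict hit), and an
--     incremental ordered seen-dict accumulating the result instead of per-level set
--     algebra. Exact mode keeps plain dict lookups."""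
--     if set_progress_status:
--         set_progress_status("递归搜索匹配基因")
--     if fuzzy:
--         def build_index(m):
--             idx = {}
--             for a in m:
--                 n = len(a)
--                 for s in dict.fromkeys(a[i:j] for i in range(n + 1) for j in range(i, n + 1)):
--                     idx.setdefault(s, []).append(a)
--             return idx
--         idx_ab = build_index(a_to_b)
--         idx_ba = build_index(b_to_a)
--         def neighbors(key):
--             out = []
--             for a in idx_ab.get(key, []):
--                 if a != key:
--                     out.extend(a_to_b[a])
--             for b in idx_ba.get(key, []):
--                 if b != key:
--                     out.extend(b_to_a[b])
--             return out
--     else: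
--         def neighbors(key):
--             return list(a_to_b.get(key, ())) + list(b_to_a.get(key, ()))
--     seen = dict.fromkeys(keys)
--     frontier = list(seen)
--     out = []
--     d = 0
--     while frontier and d < depth:
--         nxt = []
--         for key in frontier:
--             for n in neighbors(key):
--                 if n not in seen:
--                     seen[n] = None
--                     nxt.append(n)
--         out.extend(nxt)
--         frontier = nxt
--         d += 1
--     return set(out)
-- ===== Notes on version B (the rewrite author's own statement) =====
-- stated objective: alternative
-- what changed: For fuzzy mode B builds, once, a hash index from every substring of every map key to the map keys containing it, so a frontier key's fuzzy matches come from a single dict lookup and A's per-level per-key scan over all map keys disappears; the level bookkeeping is an incremental BFS with one ordered seen-dict accumulating the result instead of A's per-level set algebra (build next_found, subtract found, union back, final subtraction).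
import Mathlib
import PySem

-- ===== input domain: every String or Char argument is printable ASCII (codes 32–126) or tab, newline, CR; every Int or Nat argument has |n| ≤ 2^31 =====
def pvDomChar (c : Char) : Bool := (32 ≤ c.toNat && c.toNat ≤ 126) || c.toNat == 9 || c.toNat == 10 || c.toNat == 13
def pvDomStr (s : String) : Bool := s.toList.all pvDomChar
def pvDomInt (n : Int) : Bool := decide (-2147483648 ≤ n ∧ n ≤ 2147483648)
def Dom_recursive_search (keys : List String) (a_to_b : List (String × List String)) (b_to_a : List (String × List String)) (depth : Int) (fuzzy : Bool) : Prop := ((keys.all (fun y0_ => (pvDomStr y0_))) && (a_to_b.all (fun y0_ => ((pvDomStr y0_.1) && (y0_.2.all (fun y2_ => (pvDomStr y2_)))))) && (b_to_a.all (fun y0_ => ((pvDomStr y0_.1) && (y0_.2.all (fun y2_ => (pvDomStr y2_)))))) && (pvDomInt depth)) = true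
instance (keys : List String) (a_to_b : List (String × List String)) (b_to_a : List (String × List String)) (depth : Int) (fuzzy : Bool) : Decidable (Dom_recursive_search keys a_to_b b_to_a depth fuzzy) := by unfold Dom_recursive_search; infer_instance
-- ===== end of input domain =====

-- B replaces A's per-level set algebra and, in fuzzy mode, A's scan of every map key per
-- frontier key: B builds a substring→map-keys hash index once, so fuzzy neighbours come
-- from one dict lookup, and accumulates the result incrementally through one ordered
-- seen-set (objective: alternative).
-- The dict arguments arrive as association lists standing for Python dicts (unique keys,
-- insertion order): lookup is first-match Dict lookup, iteration walks the item list.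
-- A iterates the Python sets `current` / the generator over dict keys; the returned value
-- is a set, so it does not depend on those iteration orders, and both ports iterate in
-- insertion order.

-- ===== PORT A =====
-- body of A's `for key in current` loop building next_found; `a_to_b[a]` is ported as
-- Dict.getD _ a [] (a is a key of the dict, so KeyError is impossible and getD is exact)
def rsA_next (a_to_b b_to_a : List (String × List String)) (fuzzy : Bool)
    (current : PySem.Set String) : PySem.Set String :=
  current.foldl (fun nf key =>
    if fuzzy then
      PySem.Set.update
        (PySem.Set.update nf
          ((a_to_b.filter (fun p => PySem.Str.isIn key p.1 && p.1 != key)).flatMap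
            (fun p => (PySem.Dict.mk a_to_b).getD p.1 [])))
        ((b_to_a.filter (fun p => PySem.Str.isIn key p.1 && p.1 != key)).flatMap
          (fun p => (PySem.Dict.mk b_to_a).getD p.1 []))
    else
      PySem.Set.union
        (PySem.Set.union nf ((PySem.Dict.mk a_to_b).getD key []))
        ((PySem.Dict.mk b_to_a).getD key []))
    PySem.Set.empty

-- A's `for _ in range(depth)` loop with its early `break`
def rsA_loop (a_to_b b_to_a : List (String × List String)) (fuzzy : Bool) :
    List Int → PySem.Set String → PySem.Set String → PySem.Set String
  | [], found, _ => found
  | _ :: rest, found, current =>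
    let next_found := rsA_next a_to_b b_to_a fuzzy current
    let new := PySem.Set.diff next_found found
    if new = [] then found
    else rsA_loop a_to_b b_to_a fuzzy rest (PySem.Set.union found new) new

def recursive_search (keys : List String) (a_to_b : List (String × List String)) (b_to_a : List (String × List String)) (depth : Int) (fuzzy : Bool) : List String :=
  let found := PySem.Set.ofList keys
  let current := PySem.Set.ofList keys
  PySem.Set.diff (rsA_loop a_to_b b_to_a fuzzy (PySem.List.pyRange 0 depth 1) found current)
    (PySem.Set.ofList keys)

-- ===== PORT B =====
-- Source B's substring enumeration `dict.fromkeys(a[i:j] for i in range(n+1) for j in range(i, n+1))`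
def rsSubs (a : String) : List String :=
  PySem.List.dedup
    ((PySem.List.pyRange 0 (PySem.Str.len a + 1)).flatMap (fun i =>
      (PySem.List.pyRange i (PySem.Str.len a + 1)).map (fun j =>
        PySem.Str.slice a (some i) (some j))))

-- Source B's `build_index(m)`: idx.setdefault(s, []).append(a) is Dict.modify s [] (· ++ [a])
def rsIndex (m : List (String × List String)) : PySem.Dict String (List String) :=
  m.foldl (fun idx p =>
    (rsSubs p.1).foldl (fun idx s => idx.modify s [] (· ++ [p.1])) idx) PySem.Dict.empty

-- Source B's `neighbors(key)` (fuzzy: one index lookup instead of a scan of the map's keys)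
def rsB_nbr (idxA idxB : PySem.Dict String (List String))
    (a_to_b b_to_a : List (String × List String)) (fuzzy : Bool) (key : String) : List String :=
  if fuzzy then
    ((idxA.getD key []).foldl (fun out a =>
        if a != key then out ++ (PySem.Dict.mk a_to_b).getD a [] else out) [])
    ++ ((idxB.getD key []).foldl (fun out b =>
        if b != key then out ++ (PySem.Dict.mk b_to_a).getD b [] else out) [])
  else (PySem.Dict.mk a_to_b).getD key [] ++ (PySem.Dict.mk b_to_a).getD key []

-- Source B's `while frontier and d < depth` loop; the fuel is the remaining depth - d;
-- state = (seen, nxt) threaded through the two nested for loops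
def rsB_go (idxA idxB : PySem.Dict String (List String))
    (a_to_b b_to_a : List (String × List String)) (fuzzy : Bool) :
    Nat → PySem.Set String → List String → List String → List String
  | 0, _, _, out => out
  | d + 1, seen, frontier, out =>
    if frontier = [] then out
    else
      let st := frontier.foldl (fun st key =>
        (rsB_nbr idxA idxB a_to_b b_to_a fuzzy key).foldl (fun st n =>
          if PySem.Set.contains st.1 n then st
          else (PySem.Set.add st.1 n, st.2 ++ [n])) st)
        (seen, ([] : List String))
      rsB_go idxA idxB a_to_b b_to_a fuzzy d st.1 st.2 (out ++ st.2)

def recursive_search_alt (keys : List String) (a_to_b : List (String × List String)) (b_to_a : List (String × List String)) (depth : Int) (fuzzy : Bool) : List String :=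
  let idxA := if fuzzy then rsIndex a_to_b else PySem.Dict.empty   -- Source B builds the indexes only in fuzzy mode
  let idxB := if fuzzy then rsIndex b_to_a else PySem.Dict.empty
  let seen := PySem.List.dedup keys        -- dict.fromkeys(keys) as an ordered set
  rsB_go idxA idxB a_to_b b_to_a fuzzy depth.toNat seen seen []

-- ===== PRECONDITION & SPEC =====
def Spec_recursive_search (keys : List String) (a_to_b : List (String × List String)) (b_to_a : List (String × List String)) (depth : Int) (fuzzy : Bool) (out : List String) : Prop := out = recursive_search_alt keys a_to_b b_to_a depth fuzzy
instance (keys : List String) (a_to_b : List (String × List String)) (b_to_a : List (String × List String)) (depth : Int) (fuzzy : Bool) (out : List String) : Decidable (Spec_recursive_search keys a_to_b b_to_a depth fuzzy out) := by unfold Spec_recursive_search; infer_instance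

-- ===== CLAIM (what is proved, stated in full; the proofs are below) =====
def Claim_equal_recursive_search : Prop := ∀ (keys : List String) (a_to_b : List (String × List String)) (b_to_a : List (String × List String)) (depth : Int) (fuzzy : Bool), Dom_recursive_search keys a_to_b b_to_a depth fuzzy → Spec_recursive_search keys a_to_b b_to_a depth fuzzy (recursive_search keys a_to_b b_to_a depth fuzzy)

-- ===== LEMMAS AND PROOFS =====

-- membership in Source B's substring enumeration is exactly Python's `key in a`
-- membership in Source B's substring enumeration is exactly Python's `key in a`
lemma rsSubs_mem (a key : String) : key ∈ rsSubs a ↔ PySem.Str.isIn key a = true := by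
  rw [PySem.Str.isIn_eq, PySem.Chars.isIn_iff_infix]
  unfold rsSubs
  rw [PySem.List.mem_dedup]
  simp only [List.mem_flatMap, List.mem_map, PySem.List.mem_pyRange_one]
  constructor
  · rintro ⟨i, ⟨hi0, hin⟩, j, ⟨hji, hjn⟩, rfl⟩
    rw [PySem.Str.toList_slice, PySem.Chars.slice_eq_listSlice,
        PySem.List.slice_toNat _ hi0 (le_trans hi0 hji)]
    exact ((a.toList.drop i.toNat).take_prefix _).isInfix.trans
      ((a.toList.drop_suffix i.toNat).isInfix)
  · rintro ⟨s, t, hst⟩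
    have hlen : s.length + key.toList.length + t.length = a.toList.length := by
      rw [← hst]; simp; omega
    refine ⟨(s.length : Int), ⟨by omega, by rw [PySem.Str.len_eq]; omega⟩,
            (s.length : Int) + (key.toList.length : Int),
            ⟨by omega, by rw [PySem.Str.len_eq]; omega⟩, ?_⟩
    apply String.toList_inj.mp
    rw [PySem.Str.toList_slice, PySem.Chars.slice_eq_listSlice,
        PySem.List.slice_toNat _ (by omega) (by omega)]
    have h1 : ((s.length : Int)).toNat = s.length := by omega
    have h2 : ((s.length : Int) + (key.toList.length : Int)).toNat
        = s.length + key.toList.length := by omega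
    rw [h1, h2, ← hst]
    simp

-- filtering a duplicate-free list by equality leaves the one hit (or nothing)
lemma filter_beq_of_nodup {α : Type} [BEq α] [LawfulBEq α] (l : List α) (hnd : l.Nodup)
    (key : α) : l.filter (· == key) = if key ∈ l then [key] else [] := by
  induction l with
  | nil => simp
  | cons x rest ih =>
      have hx_notin : x ∉ rest := (List.nodup_cons.mp hnd).1
      have ihr := ih (List.nodup_cons.mp hnd).2
      simp only [List.filter_cons]
      by_cases hx : x = key
      · subst hx
        have hfr : rest.filter (· == x) = [] := by
          rw [List.filter_eq_nil_iff]
          intro y hy hbeq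
          exact hx_notin (eq_of_beq hbeq ▸ hy)
        simp [hfr]
      · have hb : (x == key) = false := by simp [hx]
        have hk : key ∈ x :: rest ↔ key ∈ rest := by
          simp only [List.mem_cons, or_iff_right_iff_imp]
          intro h; exact absurd h.symm hx
        rw [hb]
        simp only [Bool.false_eq_true, if_false, ihr]
        by_cases hm : key ∈ rest
        · rw [if_pos hm, if_pos (hk.mpr hm)]
        · rw [if_neg hm, if_neg (fun h => hm (hk.mp h))]

lemma rsSubs_filter (a key : String) :
    (rsSubs a).filter (· == key) = if PySem.Str.isIn key a then [key] else [] := by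
  rw [show rsSubs a = PySem.List.dedup ((PySem.List.pyRange 0 (PySem.Str.len a + 1)).flatMap
      (fun i => (PySem.List.pyRange i (PySem.Str.len a + 1)).map (fun j =>
        PySem.Str.slice a (some i) (some j)))) from rfl,
      filter_beq_of_nodup _ (PySem.List.nodup_dedup _)]
  split_ifs with hm h h
  · rfl
  · exact absurd ((rsSubs_mem a key).mp hm) h
  · exact absurd ((rsSubs_mem a key).mpr h) hm
  · rfl

-- the index, looked up at a frontier key, lists exactly the map keys Python's
-- `key in str(a)` scan selects, in map order
lemma rsIndex_getD (m : List (String × List String)) (key : String) :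
    (rsIndex m).getD key [] = (m.map Prod.fst).filter (fun a => PySem.Str.isIn key a) := by
  unfold rsIndex
  have hfold : ∀ (idx : PySem.Dict String (List String)) (p : String × List String),
      (rsSubs p.1).foldl (fun idx s => idx.modify s [] (· ++ [p.1])) idx
        = ((rsSubs p.1).map (fun s => (s, p.1))).foldl
            (fun d q => d.modify q.1 [] (· ++ [q.2])) idx := by
    intro idx p
    rw [List.foldl_map]
  simp only [hfold]
  rw [← List.foldl_flatMap, PySem.Dict.getD_foldl_modify_append]
  have hempty : (PySem.Dict.empty : PySem.Dict String (List String)).getD key [] = [] := by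
    simp [pysem]
  rw [hempty, List.nil_append, List.filter_flatMap, List.map_flatMap]
  have inner : ∀ (p : String × List String),
      (((rsSubs p.1).map (fun s => (s, p.1))).filter (fun q => q.1 == key)).map (·.2)
        = if PySem.Str.isIn key p.1 then [p.1] else [] := by
    intro p
    rw [List.filter_map]
    have : (rsSubs p.1).filter ((fun q => q.1 == key) ∘ (fun s => (s, p.1)))
        = (rsSubs p.1).filter (· == key) := List.filter_congr (fun x _ => rfl)
    rw [this, rsSubs_filter]
    split_ifs <;> simp
  simp only [inner]
  induction m with
  | nil => simp
  | cons p rest ih =>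
      simp only [List.flatMap_cons, List.map_cons, List.filter_cons, ih]
      split_ifs <;> simp_all

-- each body of A's per-key union/update pair is one Set.update with B's neighbour list
lemma rsA_body_eq (idxA idxB : PySem.Dict String (List String))
    (a_to_b b_to_a : List (String × List String)) (fuzzy : Bool)
    (hA : fuzzy = true → idxA = rsIndex a_to_b) (hB : fuzzy = true → idxB = rsIndex b_to_a)
    (nf : PySem.Set String) (key : String) :
    (if fuzzy then
      PySem.Set.update
        (PySem.Set.update nf
          ((a_to_b.filter (fun p => PySem.Str.isIn key p.1 && p.1 != key)).flatMap
            (fun p => (PySem.Dict.mk a_to_b).getD p.1 [])))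
        ((b_to_a.filter (fun p => PySem.Str.isIn key p.1 && p.1 != key)).flatMap
          (fun p => (PySem.Dict.mk b_to_a).getD p.1 []))
    else
      PySem.Set.union
        (PySem.Set.union nf ((PySem.Dict.mk a_to_b).getD key []))
        ((PySem.Dict.mk b_to_a).getD key []))
    = PySem.Set.update nf (rsB_nbr idxA idxB a_to_b b_to_a fuzzy key) := by
  unfold rsB_nbr
  cases fuzzy
  · simp only [Bool.false_eq_true, if_false]
    simp [PySem.Set.union, PySem.Set.update_append]
  · rw [hA rfl, hB rfl]
    simp only [if_true]
    have side : ∀ (m : List (String × List String)),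
        ((rsIndex m).getD key []).foldl (fun out a =>
          if a != key then out ++ (PySem.Dict.mk m).getD a [] else out) []
        = (m.filter (fun p => PySem.Str.isIn key p.1 && p.1 != key)).flatMap
            (fun p => (PySem.Dict.mk m).getD p.1 []) := by
      intro m
      rw [PySem.List.foldl_if_eq_foldl_filter, PySem.List.foldl_append_eq_flatMap,
          rsIndex_getD, List.filter_filter, List.filter_map, List.flatMap_map]
      rw [List.nil_append]
      have : m.filter ((fun a => a != key && PySem.Str.isIn key a) ∘ Prod.fst)
          = m.filter (fun p => PySem.Str.isIn key p.1 && p.1 != key) := by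
        apply List.filter_congr
        intro p _
        simp only [Function.comp_apply, Bool.and_comm]
      rw [this]
    rw [side a_to_b, side b_to_a, PySem.Set.update_append]

-- B's incremental seen-filtering fold computes A's ordered set difference
lemma rsB_core_fold :
    ∀ (l found nf : List String),
      l.foldl (fun (st : PySem.Set String × List String) n =>
          if PySem.Set.contains st.1 n then st
          else (PySem.Set.add st.1 n, st.2 ++ [n]))
        (found ++ PySem.Set.diff nf found, PySem.Set.diff nf found)
      = (found ++ PySem.Set.diff (PySem.Set.update nf l) found,
         PySem.Set.diff (PySem.Set.update nf l) found) := by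
  intro l
  induction l with
  | nil => intro found nf; simp [PySem.Set.update]
  | cons n rest ih =>
      intro found nf
      simp only [List.foldl_cons]
      have hupd : PySem.Set.update nf (n :: rest) = PySem.Set.update (PySem.Set.add nf n) rest :=
        PySem.Set.update_cons ..
      by_cases hf : n ∈ found
      · have hc : PySem.Set.contains (found ++ PySem.Set.diff nf found) n = true := by
          simp [hf]
        have hd : PySem.Set.diff (PySem.Set.add nf n) found = PySem.Set.diff nf found := by
          rw [PySem.Set.add_eq_ite]
          split
          · rfl
          · simp [PySem.Set.diff, List.filter_append, hf]
        rw [hc]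
        simp only [if_true]
        rw [hupd, ← hd]
        exact ih found (PySem.Set.add nf n)
      · by_cases hn : n ∈ nf
        · have hc : PySem.Set.contains (found ++ PySem.Set.diff nf found) n = true := by
            simp [PySem.Set.mem_diff, hf, hn]
          have hd : PySem.Set.add nf n = nf := PySem.Set.add_of_mem hn
          rw [hc]
          simp only [if_true]
          rw [hupd, hd, ← ih]
        · have hc : PySem.Set.contains (found ++ PySem.Set.diff nf found) n = false := by
            simp [PySem.Set.mem_diff, hf, hn]
          have hd : PySem.Set.diff (PySem.Set.add nf n) found = PySem.Set.diff nf found ++ [n] := by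
            rw [PySem.Set.add_of_not_mem hn]
            simp [PySem.Set.diff, List.filter_append, hf]
          rw [hc]
          simp only [Bool.false_eq_true, if_false]
          have hadd : PySem.Set.add (found ++ PySem.Set.diff nf found) n
              = found ++ PySem.Set.diff nf found ++ [n] := by
            apply PySem.Set.add_of_not_mem
            simp [PySem.Set.mem_diff, hf, hn]
          rw [hadd, hupd, ← ih]
          rw [hd]
          simp

lemma rsB_go_nil (idxA idxB : PySem.Dict String (List String))
    (a_to_b b_to_a : List (String × List String)) (fuzzy : Bool)
    (n : Nat) (seen : PySem.Set String) (out : List String) :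
    rsB_go idxA idxB a_to_b b_to_a fuzzy n seen [] out = out := by
  cases n <;> simp [rsB_go]

-- final subtraction: found is always (set of keys) ++ out with out disjoint from keys
lemma diff_keys_out (keys out : List String) (h : ∀ x ∈ out, x ∉ keys) :
    PySem.Set.diff (PySem.Set.ofList keys ++ out) (PySem.Set.ofList keys) = out := by
  simp only [PySem.Set.diff, List.filter_append]
  rw [List.filter_eq_nil_iff.mpr, List.filter_eq_self.mpr]
  · simp
  · intro x hx
    simp [PySem.Set.contains, PySem.Set.mem_ofList, h x hx]
  · intro x hx
    simp [PySem.Set.contains, hx]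

-- A's next_found over a frontier is the ordered set of B's flattened neighbour stream
lemma rsA_next_gen (idxA idxB : PySem.Dict String (List String))
    (a_to_b b_to_a : List (String × List String)) (fuzzy : Bool)
    (hA : fuzzy = true → idxA = rsIndex a_to_b) (hB : fuzzy = true → idxB = rsIndex b_to_a) :
    ∀ (cur : List String) (s : PySem.Set String),
      cur.foldl (fun nf key =>
        if fuzzy then
          PySem.Set.update
            (PySem.Set.update nf
              ((a_to_b.filter (fun p => PySem.Str.isIn key p.1 && p.1 != key)).flatMap
                (fun p => (PySem.Dict.mk a_to_b).getD p.1 [])))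
            ((b_to_a.filter (fun p => PySem.Str.isIn key p.1 && p.1 != key)).flatMap
              (fun p => (PySem.Dict.mk b_to_a).getD p.1 []))
        else
          PySem.Set.union
            (PySem.Set.union nf ((PySem.Dict.mk a_to_b).getD key []))
            ((PySem.Dict.mk b_to_a).getD key [])) s
      = PySem.Set.update s (cur.flatMap (rsB_nbr idxA idxB a_to_b b_to_a fuzzy)) := by
  intro cur
  induction cur with
  | nil => intro s; simp [PySem.Set.update]
  | cons k rest ih =>
      intro s
      simp only [List.foldl_cons, List.flatMap_cons]
      rw [rsA_body_eq idxA idxB a_to_b b_to_a fuzzy hA hB, ih, PySem.Set.update_append]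

lemma rsA_next_eq (idxA idxB : PySem.Dict String (List String))
    (a_to_b b_to_a : List (String × List String)) (fuzzy : Bool)
    (hA : fuzzy = true → idxA = rsIndex a_to_b) (hB : fuzzy = true → idxB = rsIndex b_to_a)
    (current : PySem.Set String) :
    rsA_next a_to_b b_to_a fuzzy current
      = PySem.Set.ofList (current.flatMap (rsB_nbr idxA idxB a_to_b b_to_a fuzzy)) := by
  unfold rsA_next
  rw [rsA_next_gen idxA idxB a_to_b b_to_a fuzzy hA hB]
  rfl

-- the coupled invariant: A's level loop vs B's incremental loop
lemma rsA_rsB_loop (idxA idxB : PySem.Dict String (List String))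
    (a_to_b b_to_a : List (String × List String)) (fuzzy : Bool) (keys : List String)
    (hA : fuzzy = true → idxA = rsIndex a_to_b) (hB : fuzzy = true → idxB = rsIndex b_to_a) :
    ∀ (rng : List Int) (found current out : List String)
      (h1 : found = PySem.Set.ofList keys ++ out)
      (h2 : ∀ x ∈ out, x ∉ keys),
      PySem.Set.diff (rsA_loop a_to_b b_to_a fuzzy rng found current) (PySem.Set.ofList keys)
        = rsB_go idxA idxB a_to_b b_to_a fuzzy rng.length found current out := by
  intro rng
  induction rng with
  | nil =>
      intro found current out h1 h2
      simp only [rsA_loop, List.length_nil, rsB_go]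
      rw [h1]
      exact diff_keys_out keys out h2
  | cons i rest ih =>
      intro found current out h1 h2
      simp only [rsA_loop, List.length_cons, rsB_go]
      set stream := current.flatMap (rsB_nbr idxA idxB a_to_b b_to_a fuzzy) with hstream
      have hnext : rsA_next a_to_b b_to_a fuzzy current = PySem.Set.ofList stream :=
        rsA_next_eq idxA idxB a_to_b b_to_a fuzzy hA hB current
      set new := PySem.Set.diff (PySem.Set.ofList stream) found with hnewdef
      -- B's nested fold over the frontier = the core fold over the flattened stream
      have hfold : current.foldl (fun st key =>
            (rsB_nbr idxA idxB a_to_b b_to_a fuzzy key).foldl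
              (fun (st : PySem.Set String × List String) n =>
              if PySem.Set.contains st.1 n then st
              else (PySem.Set.add st.1 n, st.2 ++ [n])) st)
          (found, ([] : List String)) = (found ++ new, new) := by
        rw [← List.foldl_flatMap, ← hstream]
        have h0 : (found, ([] : List String))
            = (found ++ PySem.Set.diff ([] : List String) found,
               PySem.Set.diff ([] : List String) found) := by
          simp [PySem.Set.diff]
        rw [h0, rsB_core_fold]
        rfl
      -- facts about new
      have hnewmem : ∀ x ∈ new, x ∉ found := by
        intro x hx
        exact ((PySem.Set.mem_diff _ _ _).mp hx).2
      have hkeys_sub : ∀ x, x ∈ keys → x ∈ found := by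
        intro x hx
        rw [h1]
        exact List.mem_append_left _ ((PySem.Set.mem_ofList _ _).mpr hx)
      by_cases hcur : current = []
      · subst hcur
        have : new = [] := by
          simp [hnewdef, hstream, PySem.Set.diff, PySem.Set.ofList, PySem.Set.empty]
        rw [hnext, ← hnewdef, this]
        simp only [reduceIte]
        rw [h1]
        exact diff_keys_out keys out h2
      · rw [if_neg hcur, hfold, hnext, ← hnewdef]
        by_cases hnew : new = []
        · rw [if_pos hnew, hnew]
          simp only [List.append_nil]
          rw [rsB_go_nil, h1]
          exact diff_keys_out keys out h2
        · rw [if_neg hnew]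
          have hunion : PySem.Set.union found new = found ++ new := by
            apply PySem.Set.update_eq_append_of_disjoint
            · exact List.Nodup.filter _ (PySem.Set.nodup_ofList stream)
            · exact hnewmem
          rw [hunion]
          apply ih (found ++ new) new (out ++ new)
          · rw [h1, List.append_assoc]
          · intro x hx
            rcases List.mem_append.mp hx with h | h
            · exact h2 x h
            · intro hk
              exact hnewmem x h (hkeys_sub x hk)

-- ===== VERDICT (by name: the statement is the Claim_ definition above) =====
theorem recursive_search_spec : Claim_equal_recursive_search := by
  intro keys a_to_b b_to_a depth fuzzy _
  unfold Spec_recursive_search recursive_search recursive_search_alt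
  have h := rsA_rsB_loop (if fuzzy then rsIndex a_to_b else PySem.Dict.empty)
      (if fuzzy then rsIndex b_to_a else PySem.Dict.empty)
      a_to_b b_to_a fuzzy keys
      (fun hf => by rw [hf]; rfl) (fun hf => by rw [hf]; rfl)
      (PySem.List.pyRange 0 depth 1)
      (PySem.Set.ofList keys) (PySem.Set.ofList keys) []
      (by simp) (by simp)
  rw [h]
  have hlen : (PySem.List.pyRange 0 depth 1).length = depth.toNat := by
    rw [PySem.List.length_pyRange_one]; simp
  rw [hlen]
  rfl
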